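-- pv_equiv track=rewrite | github.com/rashadkm/grass_cmake | grass/trunk/lib/python/script/core.py | _compare_units
-- ===== SOURCE A (Python) =====
-- def _compare_units(dic):
--     """
--         !Check if units has some possibility of duplicate names like
--         meter and metre and unify them
--
--         @param dic The dictionary containing information about units
--
--         @return The dictionary with the new values if needed
--
--     """
--     # the lookup variable is a list of list, each list contains all the
--     # possible name for a units
--     lookup = [['meter', 'metre'], ['meters', 'metres'], ['kilometer',
--               'kilometre'], ['kilometers', 'kilometres']]
--     for l in lookup:
--         for n in range(len(dic['unit'])):
--             if dic['unit'][n] in l: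
--                 dic['unit'][n] = l[0]
--         for n in range(len(dic['units'])):
--             if dic['units'][n] in l:
--                 dic['units'][n] = l[0]
--     return dic
-- ===== SOURCE B (Python) =====
-- def _compare_units(dic):
--     """Normalize unit-name spelling variants (metre->meter etc.).
--     Rule-based string rewriting instead of A's synonym table: factor an
--     optional plural 's' off the name, rewrite the '-re' ending of the
--     two British singulars to '-er', and re-append the plural.  One pass
--     per list instead of A's repeated scans per variant group.  Mutates
--     dic (rebinds the two keys to new lists) and returns it like A."""
--     def canon(n):
--         base, plural = (n[:-1], 's') if n.endswith('s') else (n, '')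
--         if base in ('metre', 'kilometre'):
--             base = base[:-2] + 'er'
--         return base + plural
--     for key in ('unit', 'units'):
--         dic[key] = [canon(n) for n in dic[key]]
--     return dic
-- ===== Notes on version B (the rewrite author's own statement) =====
-- stated objective: alternative
-- what changed: A is table-driven: four synonym groups each scanned against both lists by index with in-place writes; B has no synonym table at all - it canonicalizes each name by string rewriting (strip an optional plural 's', rewrite the '-re' ending of the singulars 'metre'/'kilometre' to '-er', re-append the 's') in one pass per list.
import Mathlib
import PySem

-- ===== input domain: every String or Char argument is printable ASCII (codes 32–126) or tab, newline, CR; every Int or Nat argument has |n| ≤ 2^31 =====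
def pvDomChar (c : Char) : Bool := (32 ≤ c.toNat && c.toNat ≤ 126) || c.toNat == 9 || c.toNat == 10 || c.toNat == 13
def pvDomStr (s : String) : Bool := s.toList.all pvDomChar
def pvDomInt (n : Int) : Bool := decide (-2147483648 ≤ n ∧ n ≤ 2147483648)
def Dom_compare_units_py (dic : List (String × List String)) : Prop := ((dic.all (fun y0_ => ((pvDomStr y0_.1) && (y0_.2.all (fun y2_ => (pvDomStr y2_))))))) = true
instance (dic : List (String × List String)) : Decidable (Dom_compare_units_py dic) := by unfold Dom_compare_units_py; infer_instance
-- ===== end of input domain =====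

-- B replaces A's synonym table (four groups, each scanned against both lists) by rule-based
-- string rewriting (strip plural 's', rewrite metre/kilometre's '-re' to '-er', re-append).
-- Side effects: both Pythons mutate dic (A edits the inner lists in place, B rebinds the two
-- keys to fresh lists); the equivalence proved here is about the return value.

-- ===== PORT A =====
-- the literal `lookup` table of A
def pvLookup : List (List String) :=
  [["meter", "metre"], ["meters", "metres"], ["kilometer", "kilometre"],
   ["kilometers", "kilometres"]]

-- `for n in range(len(xs)): if xs[n] in l: xs[n] = l[0]` — the in-place index loop on one list;
-- n is always in range, so xs[n] is List.getD and the assignment is List.set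
def pvGroupPass (l : List String) (xs : List String) : List String :=
  (List.range xs.length).foldl
    (fun ys n => if l.contains (ys.getD n "") then ys.set n (l.headD "") else ys) xs

def compare_units_py (dic : List (String × List String)) : List (String × List String) :=
  -- dic['unit'] / dic['units'] raise KeyError when the key is missing; Pre_ excludes that,
  -- so getD with default [] is exact on the admitted inputs
  (pvLookup.foldl
    (fun d l =>
      let d := d.insert "unit" (pvGroupPass l (d.getD "unit" []))
      d.insert "units" (pvGroupPass l (d.getD "units" [])))
    (PySem.Dict.ofList dic)).items

-- ===== PORT B =====
-- Source B's `canon(n)`: factor off an optional plural 's' (n[:-1] is the slice n[:-1]),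
-- rewrite the '-re' ending of the singulars 'metre'/'kilometre' to '-er', re-append the 's';
-- on List Char with PySem slices, exact for the admitted strings
def pvCanon (n : String) : String :=
  let bp : List Char × List Char :=
    if PySem.Chars.endswith n.toList ['s'] = true
    then (PySem.Chars.slice n.toList none (some (-1)), ['s'])
    else (n.toList, [])
  let base : List Char :=
    if bp.1 = "metre".toList ∨ bp.1 = "kilometre".toList
    then PySem.Chars.slice bp.1 none (some (-2)) ++ ['e', 'r']
    else bp.1
  String.ofList (base ++ bp.2)

def compare_units_py_alt (dic : List (String × List String)) : List (String × List String) :=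
  -- `for key in ('unit','units'): dic[key] = [canon(n) for n in dic[key]]`
  (["unit", "units"].foldl
    (fun d key => d.insert key ((d.getD key []).map pvCanon))
    (PySem.Dict.ofList dic)).items

-- ===== PRECONDITION & SPEC =====
-- exactly the inputs where Python A returns: both keys 'unit' and 'units' present (else KeyError)
def Pre_compare_units_py (dic : List (String × List String)) : Prop :=
  "unit" ∈ dic.map Prod.fst ∧ "units" ∈ dic.map Prod.fst
  -- both spellings of the key must be present: "units" is "unit" with a trailing 's'
instance (dic : List (String × List String)) : Decidable (Pre_compare_units_py dic) := by
  unfold Pre_compare_units_py; infer_instance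

def pvWitness_compare_units_py : (List (String × List String)) :=
  [("unit", []), ("units", ["metre"])]

def Spec_compare_units_py (dic : List (String × List String)) (out : List (String × List String)) : Prop := out = compare_units_py_alt dic
instance (dic : List (String × List String)) (out : List (String × List String)) : Decidable (Spec_compare_units_py dic out) := by unfold Spec_compare_units_py; infer_instance

-- ===== CLAIM (what is proved, stated in full; the proofs are below) =====
def Claim_equal_compare_units_py : Prop := ∀ (dic : List (String × List String)), Dom_compare_units_py dic → Pre_compare_units_py dic → Spec_compare_units_py dic (compare_units_py dic)

-- ===== LEMMAS AND PROOFS =====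

-- the per-group pointwise substitution A applies
def pvF (l : List String) (x : String) : String := if l.contains x then l.headD "" else x

-- A's index loop over one list is the elementwise map of pvF
lemma pvGroupPass_aux (l : List String) (xs : List String) :
    ∀ (n : Nat), n ≤ xs.length →
      (List.range n).foldl
        (fun ys k => if l.contains (ys.getD k "") then ys.set k (l.headD "") else ys) xs
      = (xs.take n).map (pvF l) ++ xs.drop n := by
  intro n
  induction n with
  | zero => simp
  | succ n ih =>
    intro h
    have hn : n < xs.length := by omega
    rw [List.range_succ, List.foldl_append, ih (by omega)]
    have hlen : ((xs.take n).map (pvF l)).length = n := by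
      simp [List.length_take]; omega
    have hmin : min n xs.length = n := by omega
    have hget : ((xs.take n).map (pvF l) ++ xs.drop n).getD n "" = xs[n] := by
      rw [List.getD_eq_getElem?_getD, List.getElem?_append_right (by omega)]
      simp [hmin, List.getElem?_eq_getElem hn]
    have hdrop : xs.drop n = xs[n] :: xs.drop (n + 1) := List.drop_eq_getElem_cons hn
    have htake : xs.take (n + 1) = xs.take n ++ [xs[n]] := by
      rw [← List.take_concat_get hn, List.concat_eq_append]
    simp only [List.foldl_cons, List.foldl_nil, hget]
    rw [htake, List.map_append]
    by_cases hc : xs[n] ∈ l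
    · rw [if_pos (by simpa using hc), List.set_append_right _ _ (by omega), hlen, hdrop]
      simp only [Nat.sub_self, List.set_cons_zero]
      simp [pvF, hc]
    · rw [if_neg (by simpa using hc), hdrop]
      simp [pvF, hc]

lemma pvGroupPass_eq_map (l : List String) (xs : List String) :
    pvGroupPass l xs = xs.map (pvF l) := by
  have := pvGroupPass_aux l xs xs.length (le_refl _)
  simpa [pvGroupPass] using this

-- overwriting two DISTINCT PRESENT keys commutes even on the items list
lemma pvInsert_comm (d : PySem.Dict String (List String)) (k k' : String)
    (v w : List String) (hk : d.contains k = true) (hk' : d.contains k' = true)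
    (hne : k ≠ k') :
    (d.insert k v).insert k' w = (d.insert k' w).insert k v := by
  apply PySem.Dict.ext
  rw [PySem.Dict.items_insert_of_contains _ _ (by simp [PySem.Dict.contains_insert, hk']),
      PySem.Dict.items_insert_of_contains _ _ hk,
      PySem.Dict.items_insert_of_contains _ _ (by simp [PySem.Dict.contains_insert, hk]),
      PySem.Dict.items_insert_of_contains _ _ hk']
  simp only [List.map_map]
  apply List.map_congr_left
  intro p _
  simp only [Function.comp]
  by_cases h1 : p.1 = k <;> by_cases h2 : p.1 = k' <;> simp_all

-- the four composed per-group substitutions are B's rewriting rule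
lemma pvCanon_eq (x : String) :
    pvF ["kilometers", "kilometres"]
      (pvF ["kilometer", "kilometre"]
        (pvF ["meters", "metres"] (pvF ["meter", "metre"] x)))
    = pvCanon x := by
  by_cases hx : x ∈ ["meter", "metre", "meters", "metres", "kilometer", "kilometre",
      "kilometers", "kilometres"]
  · simp only [List.mem_cons, List.not_mem_nil, or_false] at hx
    rcases hx with rfl | rfl | rfl | rfl | rfl | rfl | rfl | rfl <;> decide
  · simp only [List.mem_cons, List.not_mem_nil, or_false, not_or] at hx
    obtain ⟨n1, n2, n3, n4, n5, n6, n7, n8⟩ := hx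
    have hA : pvF ["kilometers", "kilometres"]
        (pvF ["kilometer", "kilometre"]
          (pvF ["meters", "metres"] (pvF ["meter", "metre"] x))) = x := by
      simp [pvF, n1, n2, n3, n4, n5, n6, n7, n8]
    rw [hA]
    -- x is none of the eight names, so B's rule leaves it unchanged
    unfold pvCanon
    by_cases hs : PySem.Chars.endswith x.toList ['s'] = true
    · simp only [hs, if_true]
      obtain ⟨t, ht⟩ : ['s'] <:+ x.toList := (PySem.Chars.endswith_iff _ _).mp hs
      have hsl : PySem.Chars.slice x.toList none (some (-1)) = t := by
        rw [PySem.Chars.slice_eq_listSlice, PySem.List.slice_to_neg_one, ← ht,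
          List.dropLast_concat]
      have hb : ¬ (t = "metre".toList ∨ t = "kilometre".toList) := by
        rintro (rfl | rfl)
        · exact n4 (String.toList_inj.mp (by rw [← ht]; rfl))
        · exact n8 (String.toList_inj.mp (by rw [← ht]; rfl))
      rw [hsl, if_neg hb, ht, String.ofList_toList]
    · rw [if_neg hs]
      have hb : ¬ (x.toList = "metre".toList ∨ x.toList = "kilometre".toList) := by
        rintro (h | h)
        · exact n2 (String.toList_inj.mp h)
        · exact n6 (String.toList_inj.mp h)
      simp only [hb, if_false, List.append_nil, String.ofList_toList]

-- the body of A's fold over the lookup groups, named so the final proof can rewrite it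
def pvStep (l : List String) (d : PySem.Dict String (List String)) :
    PySem.Dict String (List String) :=
  let d := d.insert "unit" (pvGroupPass l (d.getD "unit" []))
  d.insert "units" (pvGroupPass l (d.getD "units" []))

lemma pvStep_eq (l : List String) (d : PySem.Dict String (List String)) :
    pvStep l d
    = (d.insert "unit" ((d.getD "unit" []).map (pvF l))).insert "units"
        ((d.getD "units" []).map (pvF l)) := by
  show (d.insert "unit" (pvGroupPass l (d.getD "unit" []))).insert "units"
      (pvGroupPass l
        ((d.insert "unit" (pvGroupPass l (d.getD "unit" []))).getD "units" [])) = _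
  rw [pvGroupPass_eq_map, pvGroupPass_eq_map,
    PySem.Dict.getD_insert_of_ne _ _ _ (by decide)]

-- one group step applied to a state of the invariant shape
lemma pvStepShape (d : PySem.Dict String (List String)) (l : List String)
    (a b : List String) (h2 : d.contains "units" = true) :
    pvStep l ((d.insert "unit" a).insert "units" b)
    = (d.insert "unit" (a.map (pvF l))).insert "units" (b.map (pvF l)) := by
  rw [pvStep_eq,
    PySem.Dict.getD_insert_of_ne _ _ _ (by decide),
    PySem.Dict.getD_insert_self, PySem.Dict.getD_insert_self,
    pvInsert_comm (d.insert "unit" a) "units" "unit" _ _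
      (by simp [PySem.Dict.contains_insert, h2]) (by simp)
      (by decide),
    PySem.Dict.insert_insert_self, PySem.Dict.insert_insert_self]

-- composing the four per-group maps gives B's single rewriting map
lemma pvMap4 (v : List String) :
    (((v.map (pvF ["meter", "metre"])).map (pvF ["meters", "metres"])).map
        (pvF ["kilometer", "kilometre"])).map (pvF ["kilometers", "kilometres"])
    = v.map pvCanon := by
  rw [List.map_map, List.map_map, List.map_map]
  apply List.map_congr_left
  intro x _
  simp only [Function.comp]
  exact pvCanon_eq x

-- ===== VERDICT (by name: the statement is the Claim_ definition above) =====
theorem compare_units_py_spec : Claim_equal_compare_units_py := by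
  intro dic _ hpre
  obtain ⟨-, h2⟩ := hpre
  have hc2 : (PySem.Dict.ofList dic).contains "units" = true := by
    rw [PySem.Dict.contains_iff_mem_keys,
      show PySem.Dict.ofList dic
          = dic.foldl (fun d p => d.insert p.1 p.2) PySem.Dict.empty from rfl,
      PySem.Dict.keys_foldl_insert_key]
    simpa [PySem.Set.mem_ofList] using h2
  unfold Spec_compare_units_py
  have e1 : pvStep ["meter", "metre"] (PySem.Dict.ofList dic) = (((PySem.Dict.ofList dic).insert "unit" (((PySem.Dict.ofList dic).getD "unit" []).map (pvF ["meter", "metre"]))).insert "units" (((PySem.Dict.ofList dic).getD "units" []).map (pvF ["meter", "metre"]))) := pvStep_eq ["meter", "metre"] (PySem.Dict.ofList dic)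
  have e2 : pvStep ["meters", "metres"] (pvStep ["meter", "metre"] (PySem.Dict.ofList dic)) = (((PySem.Dict.ofList dic).insert "unit" ((((PySem.Dict.ofList dic).getD "unit" []).map (pvF ["meter", "metre"])).map (pvF ["meters", "metres"]))).insert "units" ((((PySem.Dict.ofList dic).getD "units" []).map (pvF ["meter", "metre"])).map (pvF ["meters", "metres"]))) := by
    rw [e1]
    exact pvStepShape (PySem.Dict.ofList dic) ["meters", "metres"] (((PySem.Dict.ofList dic).getD "unit" []).map (pvF ["meter", "metre"])) (((PySem.Dict.ofList dic).getD "units" []).map (pvF ["meter", "metre"])) hc2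
  have e3 : pvStep ["kilometer", "kilometre"] (pvStep ["meters", "metres"] (pvStep ["meter", "metre"] (PySem.Dict.ofList dic))) = (((PySem.Dict.ofList dic).insert "unit" (((((PySem.Dict.ofList dic).getD "unit" []).map (pvF ["meter", "metre"])).map (pvF ["meters", "metres"])).map (pvF ["kilometer", "kilometre"]))).insert "units" (((((PySem.Dict.ofList dic).getD "units" []).map (pvF ["meter", "metre"])).map (pvF ["meters", "metres"])).map (pvF ["kilometer", "kilometre"]))) := by
    rw [e2]
    exact pvStepShape (PySem.Dict.ofList dic) ["kilometer", "kilometre"] ((((PySem.Dict.ofList dic).getD "unit" []).map (pvF ["meter", "metre"])).map (pvF ["meters", "metres"])) ((((PySem.Dict.ofList dic).getD "units" []).map (pvF ["meter", "metre"])).map (pvF ["meters", "metres"])) hc2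
  have e4 : pvStep ["kilometers", "kilometres"] (pvStep ["kilometer", "kilometre"] (pvStep ["meters", "metres"] (pvStep ["meter", "metre"] (PySem.Dict.ofList dic)))) = (((PySem.Dict.ofList dic).insert "unit" ((((((PySem.Dict.ofList dic).getD "unit" []).map (pvF ["meter", "metre"])).map (pvF ["meters", "metres"])).map (pvF ["kilometer", "kilometre"])).map (pvF ["kilometers", "kilometres"]))).insert "units" ((((((PySem.Dict.ofList dic).getD "units" []).map (pvF ["meter", "metre"])).map (pvF ["meters", "metres"])).map (pvF ["kilometer", "kilometre"])).map (pvF ["kilometers", "kilometres"]))) := by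
    rw [e3]
    exact pvStepShape (PySem.Dict.ofList dic) ["kilometers", "kilometres"] (((((PySem.Dict.ofList dic).getD "unit" []).map (pvF ["meter", "metre"])).map (pvF ["meters", "metres"])).map (pvF ["kilometer", "kilometre"])) (((((PySem.Dict.ofList dic).getD "units" []).map (pvF ["meter", "metre"])).map (pvF ["meters", "metres"])).map (pvF ["kilometer", "kilometre"])) hc2
  have hA : compare_units_py dic = (((PySem.Dict.ofList dic).insert "unit" ((((((PySem.Dict.ofList dic).getD "unit" []).map (pvF ["meter", "metre"])).map (pvF ["meters", "metres"])).map (pvF ["kilometer", "kilometre"])).map (pvF ["kilometers", "kilometres"]))).insert "units" ((((((PySem.Dict.ofList dic).getD "units" []).map (pvF ["meter", "metre"])).map (pvF ["meters", "metres"])).map (pvF ["kilometer", "kilometre"])).map (pvF ["kilometers", "kilometres"]))).items := by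
    show (pvLookup.foldl (fun d l => pvStep l d) (PySem.Dict.ofList dic)).items = _
    simp only [pvLookup, List.foldl_cons, List.foldl_nil]
    rw [e4]
  have hB : compare_units_py_alt dic
      = (((PySem.Dict.ofList dic).insert "unit" (((PySem.Dict.ofList dic).getD "unit" []).map pvCanon)).insert "units"
          (((PySem.Dict.ofList dic).getD "units" []).map pvCanon)).items := by
    show (((PySem.Dict.ofList dic).insert "unit" (((PySem.Dict.ofList dic).getD "unit" []).map pvCanon)).insert "units"
        ((((PySem.Dict.ofList dic).insert "unit" (((PySem.Dict.ofList dic).getD "unit" []).map pvCanon)).getD "units"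
            []).map pvCanon)).items = _
    rw [PySem.Dict.getD_insert_of_ne _ _ _ (by decide)]
  rw [hA, hB, pvMap4, pvMap4]
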